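-- pv_equiv track=rewrite | github.com/sanggoo-studies/hackerrank | practice/algorithms/implementation/Forming a Magic Square.py | formingMagicSquare
-- ===== SOURCE A (Python) =====
-- def formingMagicSquare(s):
--     cost = 81
--     x = []
--
--     for i in s:
--         x.extend(i)
--
--     # 매직스퀘어 갯수는 정해져있다
--     squares = [
--         (2, 7, 6, 9, 5, 1, 4, 3, 8),
--         (2, 9, 4, 7, 5, 3, 6, 1, 8),
--         (4, 3, 8, 9, 5, 1, 2, 7, 6),
--         (4, 9, 2, 3, 5, 7, 8, 1, 6),
--         (6, 1, 8, 7, 5, 3, 2, 9, 4),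
--         (6, 7, 2, 1, 5, 9, 8, 3, 4),
--         (8, 1, 6, 3, 5, 7, 4, 9, 2),
--         (8, 3, 4, 1, 5, 9, 6, 7, 2)
--     ]
--     for P in squares: # permutations(range(1, 10)):
--         # if sum(P[0:3]) == 15 and sum(P[3:6]) == 15 and sum(P[0::3]) == 15 and sum(P[1::3]) == 15 and sum(P[0::4]) == 15 and sum(P[2:7:2]) == 15:
--             cost = min(cost, sum(abs(P[i] - x[i]) for i in range(0, 9)))
--     return cost
-- ===== SOURCE B (Python) =====
-- def formingMagicSquare(s):
--     # Derive the magic squares by a pruned depth-first search over digit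
--     # placements instead of a hardcoded table.
--     x = [v for row in s for v in row]
--
--     def ok(g):
--         n = len(g)
--         if n == 3 or n == 6:
--             return g[n - 3] + g[n - 2] + g[n - 1] == 15
--         if n == 7:
--             return g[0] + g[3] + g[6] == 15 and g[2] + g[4] + g[6] == 15
--         if n == 8:
--             return g[1] + g[4] + g[7] == 15
--         if n == 9:
--             return g[2] + g[5] + g[8] == 15 and g[0] + g[4] + g[8] == 15
--         return True
--
--     def search(grid, unused):
--         if not unused:
--             return [grid]
--         res = []
--         for d in unused:
--             g = grid + [d]
--             if ok(g):
--                 res += search(g, [u for u in unused if u != d])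
--         return res
--
--     best = 81
--     for q in search([], list(range(1, 10))):
--         best = min(best, sum(abs(q[i] - x[i]) for i in range(9)))
--     return best
-- ===== Notes on version B (the rewrite author's own statement) =====
-- stated objective: alternative
-- what changed: B replaces A's hardcoded table of the 8 magic squares with a pruned depth-first search that places the digits 1-9 cell by cell, rejecting a partial grid as soon as a completed row, column or diagonal does not sum to 15, and takes the minimum absolute-difference cost over the squares the search finds.
import Mathlib
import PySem

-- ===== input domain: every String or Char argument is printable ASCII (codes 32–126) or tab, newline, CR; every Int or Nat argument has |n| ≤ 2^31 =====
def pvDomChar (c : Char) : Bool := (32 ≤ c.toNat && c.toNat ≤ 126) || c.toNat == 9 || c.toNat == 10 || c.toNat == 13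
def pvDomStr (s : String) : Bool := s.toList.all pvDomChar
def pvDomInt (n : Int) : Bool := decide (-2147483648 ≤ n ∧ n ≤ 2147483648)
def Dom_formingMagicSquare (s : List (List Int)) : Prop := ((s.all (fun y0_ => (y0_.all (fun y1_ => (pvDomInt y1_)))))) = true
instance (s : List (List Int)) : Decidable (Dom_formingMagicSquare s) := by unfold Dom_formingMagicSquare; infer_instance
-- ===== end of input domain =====

-- B derives the 8 magic squares by a pruned depth-first search over digit placements instead of A's hardcoded table (objective: alternative).
-- Pre_ excludes inputs whose flattened grid has fewer than 9 entries, on which A raises IndexError.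


-- ===== PORT A =====
def pvSquaresA : List (List Int) :=
  [[2, 7, 6, 9, 5, 1, 4, 3, 8],
   [2, 9, 4, 7, 5, 3, 6, 1, 8],
   [4, 3, 8, 9, 5, 1, 2, 7, 6],
   [4, 9, 2, 3, 5, 7, 8, 1, 6],
   [6, 1, 8, 7, 5, 3, 2, 9, 4],
   [6, 7, 2, 1, 5, 9, 8, 3, 4],
   [8, 1, 6, 3, 5, 7, 4, 9, 2],
   [8, 3, 4, 1, 5, 9, 6, 7, 2]]

-- sum(abs(P[i] - x[i]) for i in range(0, 9)); pyGetD is exact under Pre_ (all indices in range)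
def pvCostA (x P : List Int) : Int :=
  (PySem.List.pyRange 0 9 1).foldl
    (fun a i => a + |(PySem.List.pyGetD P i 0) - (PySem.List.pyGetD x i 0)|) 0

def formingMagicSquare (s : List (List Int)) : Int :=
  let x := s.foldl (fun acc i => acc ++ i) []
  pvSquaresA.foldl (fun cost P => min cost (pvCostA x P)) 81

-- ===== PORT B =====
-- ok(g): prune as soon as a completed row/column/diagonal misses 15; indices always in range
def pvOkB (g : List Int) : Bool :=
  let n : Int := g.length
  if n == 3 || n == 6 then
    PySem.List.pyGetD g (n - 3) 0 + PySem.List.pyGetD g (n - 2) 0 + PySem.List.pyGetD g (n - 1) 0 == 15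
  else if n == 7 then
    (PySem.List.pyGetD g 0 0 + PySem.List.pyGetD g 3 0 + PySem.List.pyGetD g 6 0 == 15) &&
    (PySem.List.pyGetD g 2 0 + PySem.List.pyGetD g 4 0 + PySem.List.pyGetD g 6 0 == 15)
  else if n == 8 then
    PySem.List.pyGetD g 1 0 + PySem.List.pyGetD g 4 0 + PySem.List.pyGetD g 7 0 == 15
  else if n == 9 then
    (PySem.List.pyGetD g 2 0 + PySem.List.pyGetD g 5 0 + PySem.List.pyGetD g 8 0 == 15) &&
    (PySem.List.pyGetD g 0 0 + PySem.List.pyGetD g 4 0 + PySem.List.pyGetD g 8 0 == 15)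
  else true

-- search(grid, unused): DFS over placements of the unused digits, pruned by pvOkB.
-- The Nat fuel only makes the recursion structural; each call strictly shrinks `unused`,
-- so fuel = unused.length (9 at the top call) is never exhausted.
def pvSearchB : Nat → List Int → List Int → List (List Int)
  | _, grid, [] => [grid]
  | 0, _, _ => []
  | n + 1, grid, unused =>
      unused.foldl (fun res d =>
        let g := grid ++ [d]
        if pvOkB g then res ++ pvSearchB n g (unused.filter (fun u => !(u == d))) else res) []

-- sum(abs(q[i] - x[i]) for i in range(9))
def pvCostB (x q : List Int) : Int :=
  (PySem.List.pyRange 0 9 1).foldl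
    (fun a i => a + |(PySem.List.pyGetD q i 0) - (PySem.List.pyGetD x i 0)|) 0

def formingMagicSquare_alt (s : List (List Int)) : Int :=
  let x := s.flatMap (fun row => row)
  (pvSearchB 9 [] [1, 2, 3, 4, 5, 6, 7, 8, 9]).foldl (fun best q => min best (pvCostB x q)) 81

-- ===== PRECONDITION & SPEC =====
-- Pre_ excludes exactly the inputs whose flattened grid has fewer than 9 entries: there A raises IndexError on x[i].
def Pre_formingMagicSquare (s : List (List Int)) : Prop := 9 ≤ s.flatten.length
instance (s : List (List Int)) : Decidable (Pre_formingMagicSquare s) := by unfold Pre_formingMagicSquare; infer_instance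

def pvWitness_formingMagicSquare : List (List Int) := [[4, 9, 2], [3, 5, 7], [8, 1, 6]]

def Spec_formingMagicSquare (s : List (List Int)) (out : Int) : Prop := out = formingMagicSquare_alt s
instance (s : List (List Int)) (out : Int) : Decidable (Spec_formingMagicSquare s out) := by unfold Spec_formingMagicSquare; infer_instance

-- ===== CLAIM (what is proved, stated in full; the proofs are below) =====
def Claim_equal_formingMagicSquare : Prop := ∀ (s : List (List Int)), Dom_formingMagicSquare s → Pre_formingMagicSquare s → Spec_formingMagicSquare s (formingMagicSquare s)

-- ===== LEMMAS AND PROOFS =====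

lemma pv_foldl_append_eq_flatten (s : List (List Int)) (acc : List Int) :
    s.foldl (fun acc i => acc ++ i) acc = acc ++ s.flatten := by
  induction s generalizing acc with
  | nil => simp
  | cons h t ih => simp [List.foldl, ih, List.append_assoc]

-- B's pruned DFS finds exactly A's 8 magic squares, in the same (lexicographic) order
set_option maxHeartbeats 4000000 in
lemma pv_searchB_eq : pvSearchB 9 [] [1, 2, 3, 4, 5, 6, 7, 8, 9] = pvSquaresA := by decide

-- the two cost expressions are the same fold
lemma pv_cost_eq (x P : List Int) : pvCostA x P = pvCostB x P := rfl

-- ===== VERDICT (by name: the statement is the Claim_ definition above) =====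
theorem formingMagicSquare_spec : Claim_equal_formingMagicSquare := by
  intro s _ _
  unfold Spec_formingMagicSquare formingMagicSquare formingMagicSquare_alt
  simp only [List.flatMap_id']
  rw [pv_foldl_append_eq_flatten, List.nil_append, pv_searchB_eq]
  simp only [pv_cost_eq]
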